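-- pv_equiv track=rewrite | github.com/akioweh/c2p | cf/cfr1027/f.py | calc
-- ===== SOURCE A (Python) =====
-- from collections import Counter
-- from itertools import accumulate
-- from math import gcd, isqrt
-- from operator import mul
--
-- def prime_factors(n: int) -> Counter[int]:
--     res = Counter()
--     while n % 2 == 0:
--         res[2] += 1
--         n //= 2
--     for div in range(3, isqrt(n) + 1, 2):
--         while n % div == 0:
--             res[div] += 1
--             n //= div
--     if n > 2:
--         res[n] += 1
--     return res
--
-- def calc(x: int, lim: int) -> int:
--     # bin packing problem with optimization for multiplicity
--     pfac = prime_factors(x)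
--     if not pfac:
--         return 0
--     if max(pfac) > lim:
--         return -1
--
--     prm, cnt = zip(*pfac.items())
--     t = len(prm)
--
--     # state compression
--     rdx = list(accumulate(map(lambda u: u + 1, cnt), func=mul, initial=1))  # radix array
--     n = rdx[-1]
--
--     # dp over subsets/states
--     dp = [(sum(cnt) + 1, 1)] * n
--     dp[0] = (1, 1)
--     for state in range(n):
--         n_bins, fill = dp[state]
--         # de-compress state
--         v = state
--         s = [0] * t
--         for i in reversed(range(t)):
--             s[i], v = divmod(v, rdx[i])
--
--         for k in range(t):
--             if s[k] == cnt[k]: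
--                 continue
--             if fill * prm[k] <= lim:
--                 cand = (n_bins, fill * prm[k])
--             else:
--                 cand = (n_bins + 1, prm[k])
--             nxt = state + rdx[k]
--             dp[nxt] = min(dp[nxt], cand)
--
--     return dp[-1][0]
-- ===== SOURCE B (Python) =====
-- # B: same guards and prime_factors, but the DP table over radix-compressed
-- # integer states is replaced by a memoized recursion over count vectors
-- # (no mixed-radix encode/decode, no dp array).
-- from collections import Counter
-- from functools import lru_cache
-- from math import isqrt
--
-- def prime_factors(n: int) -> Counter[int]:
--     res = Counter()
--     while n % 2 == 0:
--         res[2] += 1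
--         n //= 2
--     for div in range(3, isqrt(n) + 1, 2):
--         while n % div == 0:
--             res[div] += 1
--             n //= div
--     if n > 2:
--         res[n] += 1
--     return res
--
-- def calc(x: int, lim: int) -> int:
--     pfac = prime_factors(x)
--     if not pfac:
--         return 0
--     if max(pfac) > lim:
--         return -1
--
--     prm = list(pfac.keys())
--     cnt = list(pfac.values())
--     t = len(prm)
--
--     @lru_cache(maxsize=None)
--     def best(s):
--         # minimal (bins, fill-of-last-bin) to pack the sub-multiset s
--         if not any(s):
--             return (1, 1)
--         res = None
--         for k in range(t):
--             if s[k] == 0: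
--                 continue
--             b, f = best(s[:k] + (s[k] - 1,) + s[k + 1:])
--             if f * prm[k] <= lim:
--                 cand = (b, f * prm[k])
--             else:
--                 cand = (b + 1, prm[k])
--             if res is None or cand < res:
--                 res = cand
--         return res
--
--     return best(tuple(cnt))[0]
-- ===== Notes on version B (the rewrite author's own statement) =====
-- stated objective: alternative
-- what changed: The bottom-up DP over a mixed-radix-encoded flat table (with explicit state encode/decode and forward relaxation) is replaced by a memoized top-down recursion directly on prime-multiplicity vectors, eliminating the radix array, state compression and the dp list entirely.
import Mathlib
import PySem

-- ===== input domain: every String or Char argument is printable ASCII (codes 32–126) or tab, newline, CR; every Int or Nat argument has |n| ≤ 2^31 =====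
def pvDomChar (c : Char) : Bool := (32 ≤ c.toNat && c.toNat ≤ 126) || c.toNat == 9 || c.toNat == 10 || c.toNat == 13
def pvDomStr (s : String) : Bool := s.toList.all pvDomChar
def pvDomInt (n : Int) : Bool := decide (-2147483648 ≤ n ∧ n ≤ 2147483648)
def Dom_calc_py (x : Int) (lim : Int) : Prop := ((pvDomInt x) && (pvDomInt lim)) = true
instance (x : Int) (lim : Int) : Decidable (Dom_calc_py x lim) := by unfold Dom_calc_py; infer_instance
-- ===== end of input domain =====

-- B replaces A's bottom-up DP over a mixed-radix-encoded flat dp table by a memoized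
-- top-down recursion directly on prime-multiplicity vectors (objective: alternative).

-- ===== PORT A =====
def pvDivOut (d : Int) : Nat → Int → PySem.Dict Int Int → PySem.Dict Int Int × Int
  | 0, n, res => (res, n)
  | fuel + 1, n, res =>
    if PySem.Int.mod n d == 0 then
      pvDivOut d fuel (PySem.Int.floordiv n d) (res.modify d 0 (· + 1))
    else (res, n)

def pvPrimeFactors (n0 : Int) : PySem.Dict Int Int :=
  let st := pvDivOut 2 (n0.natAbs + 1) n0 PySem.Dict.empty
  let st := (PySem.List.pyRange 3 (((Int.toNat st.2).sqrt : Int) + 1) 2).foldl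
      (fun (st : PySem.Dict Int Int × Int) dv => pvDivOut dv (st.2.natAbs + 1) st.2 st.1) st
  if st.2 > 2 then st.1.modify st.2 0 (· + 1) else st.1
def pvScanMul : Int → List Int → List Int
  | a, [] => [a]
  | a, c :: cs => a :: pvScanMul (a * (c + 1)) cs

def pvMinP (p q : Int × Int) : Int × Int :=
  if p.1 < q.1 ∨ (p.1 = q.1 ∧ p.2 ≤ q.2) then p else q

def pvDecode (rdx : List Int) (t : Nat) (state : Int) : List Int × Int :=
  ((List.range t).reverse).foldl
    (fun (sv : List Int × Int) i =>
      (sv.1.set i (PySem.Int.floordiv sv.2 (rdx.getD i 0)), PySem.Int.mod sv.2 (rdx.getD i 0)))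
    (List.replicate t (0 : Int), state)

def pvInner (prm cnt rdx : List Int) (lim : Int) (t : Nat) (state : Int)
    (nbins fill : Int) (s : List Int) (dp : List (Int × Int)) : List (Int × Int) :=
  (List.range t).foldl (fun dp k =>
    if s.getD k 0 == cnt.getD k 0 then dp
    else
      let cand := if fill * prm.getD k 0 ≤ lim then (nbins, fill * prm.getD k 0)
                  else (nbins + 1, prm.getD k 0)
      let nxt := state + rdx.getD k 0
      PySem.List.pySetD dp nxt (pvMinP (PySem.List.pyGetD dp nxt (0, 0)) cand)) dp

-- 'if not pfac: return 0' is rendered as the max? = none branch: the Counter is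
-- empty exactly when it has no keys, i.e. when max? of the keys is none.
def calc_py (x : Int) (lim : Int) : Int :=
  let pfac := pvPrimeFactors x
  match PySem.List.max? pfac.keys (fun y => y) with
  | none => 0
  | some mx =>
    if mx > lim then -1
    else
      let prm := pfac.items.map (·.1)
      let cnt := pfac.items.map (·.2)
      let t := prm.length
      let rdx := pvScanMul 1 cnt
      let n := PySem.List.pyGetD rdx (-1) 0
      let dp0 := PySem.List.pySetD (List.replicate n.toNat ((cnt.sum + 1, 1) : Int × Int)) 0 (1, 1)
      let dp := (PySem.List.pyRange 0 n 1).foldl (fun dp state =>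
        let bf := PySem.List.pyGetD dp state ((0, 0) : Int × Int)
        let s := (pvDecode rdx t state).1
        pvInner prm cnt rdx lim t state bf.1 bf.2 s dp) dp0
      (PySem.List.pyGetD dp (-1) ((0, 0) : Int × Int)).1

-- ===== PORT B =====
-- Source B re-declares the module's prime_factors verbatim; its port is the identical
-- function, so the A-side transliteration pvPrimeFactors is shared instead of duplicated.

def pvBest (prm : List Int) (lim : Int) : Nat → List Int → Int × Int
  | 0, _ => (1, 1)
  | fuel + 1, s =>
    if s.all (fun v => v == 0) then (1, 1)
    else
      ((List.range s.length).foldl (fun (res : Option (Int × Int)) k =>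
        if s.getD k 0 == 0 then res
        else
          let bf := pvBest prm lim fuel (s.set k (s.getD k 0 - 1))
          let cand := if bf.2 * prm.getD k 0 ≤ lim then (bf.1, bf.2 * prm.getD k 0)
                      else (bf.1 + 1, prm.getD k 0)
          match res with
          | none => some cand
          | some r => if cand.1 < r.1 ∨ (cand.1 = r.1 ∧ cand.2 < r.2) then some cand
                      else some r) none).getD (1, 1)

def calc_py_alt (x : Int) (lim : Int) : Int :=
  let pfac := pvPrimeFactors x
  match PySem.List.max? pfac.keys (fun y => y) with
  | none => 0
  | some mx =>
    if mx > lim then -1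
    else
      let prm := pfac.keys
      let cnt := pfac.values
      (pvBest prm lim ((cnt.map Int.toNat).sum) cnt).1

-- ===== PRECONDITION & SPEC =====
-- Pre_ excludes only x ≤ 0: there Python's prime_factors raises ValueError
-- (isqrt of a negative) or, for x = 0, loops forever — A never returns outside Pre_.
def Pre_calc_py (x : Int) (lim : Int) : Prop := 1 ≤ x
instance (x : Int) (lim : Int) : Decidable (Pre_calc_py x lim) := by
  unfold Pre_calc_py; infer_instance

def pvWitness_calc_py : Int × Int := (12, 10)

def Spec_calc_py (x : Int) (lim : Int) (out : Int) : Prop := out = calc_py_alt x lim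
instance (x : Int) (lim : Int) (out : Int) : Decidable (Spec_calc_py x lim out) := by
  unfold Spec_calc_py; infer_instance

-- ===== CLAIM (what is proved, stated in full; the proofs are below) =====
def Claim_equal_calc_py : Prop :=
  ∀ (x : Int) (lim : Int), Dom_calc_py x lim → Pre_calc_py x lim →
    Spec_calc_py x lim (calc_py x lim)

-- ===== LEMMAS AND PROOFS =====



def pvR (cnt : List Int) (k : Nat) : Int := ((cnt.take k).map (· + 1)).prod

def pvEncP (cnt s : List Int) (m : Nat) : Int :=
  ∑ j ∈ Finset.range m, s.getD j 0 * pvR cnt j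

theorem pvR_zero (cnt : List Int) : pvR cnt 0 = 1 := rfl

theorem pvR_succ (cnt : List Int) (k : Nat) (h : k < cnt.length) :
    pvR cnt (k + 1) = pvR cnt k * (cnt.getD k 0 + 1) := by
  unfold pvR
  rw [List.map_take, List.take_add_one, List.prod_append]
  simp [List.getElem?_eq_getElem (show k < (cnt.map (· + 1)).length by simpa using h),
    List.getD_eq_getElem?_getD, List.getElem?_eq_getElem h]

theorem pvR_pos (cnt : List Int) (hc : ∀ i, 0 ≤ cnt.getD i 0) (k : Nat) : 0 < pvR cnt k := by
  induction k with
  | zero => simp [pvR_zero]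
  | succ k ih =>
    rcases lt_or_ge k cnt.length with h | h
    · rw [pvR_succ cnt k h]
      have := hc k
      positivity
    · unfold pvR at ih ⊢
      rw [List.take_of_length_le h, List.take_of_length_le (by omega)] at *
      exact ih


theorem pvScanMul_getD (l : List Int) : ∀ (a : Int) (k : Nat), k ≤ l.length →
    (pvScanMul a l).getD k 0 = a * pvR l k := by
  induction l with
  | nil => intro a k h; cases k with
    | zero => simp [pvScanMul, pvR_zero]
    | succ k => simp at h
  | cons c cs ih =>
    intro a k h
    cases k with
    | zero => simp [pvScanMul, pvR_zero]
    | succ k =>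
      simp only [pvScanMul, List.getD_cons_succ]
      rw [ih (a * (c + 1)) k (by simpa using h)]
      have : pvR (c :: cs) (k + 1) = (c + 1) * pvR cs k := by
        unfold pvR; simp [List.take_succ_cons]
      rw [this]; ring

theorem pvScanMul_length (a : Int) (l : List Int) : (pvScanMul a l).length = l.length + 1 := by
  induction l generalizing a with
  | nil => rfl
  | cons c cs ih => simp [pvScanMul, ih]

theorem pvEncP_succ (cnt s : List Int) (m : Nat) :
    pvEncP cnt s (m + 1) = pvEncP cnt s m + s.getD m 0 * pvR cnt m := by
  unfold pvEncP; rw [Finset.sum_range_succ]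

theorem pvEncP_nonneg (cnt s : List Int) (hc : ∀ i, 0 ≤ cnt.getD i 0)
    (hs : ∀ i, 0 ≤ s.getD i 0) (m : Nat) : 0 ≤ pvEncP cnt s m := by
  unfold pvEncP
  apply Finset.sum_nonneg
  intro j _
  exact mul_nonneg (hs j) (le_of_lt (pvR_pos cnt hc j))

theorem pvEncP_lt (cnt s : List Int) (hc : ∀ i, 0 ≤ cnt.getD i 0)
    (hs : ∀ i, 0 ≤ s.getD i 0 ∧ s.getD i 0 ≤ cnt.getD i 0) (m : Nat) (hm : m ≤ cnt.length) :
    pvEncP cnt s m < pvR cnt m := by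
  induction m with
  | zero => simp [pvEncP, pvR_zero]
  | succ m ih =>
    have h1 := ih (by omega)
    rw [pvEncP_succ, pvR_succ cnt m (by omega)]
    have h2 := (hs m).2
    have h3 := pvR_pos cnt hc m
    nlinarith

theorem pvEncP_set (cnt s : List Int) (k : Nat) (w : Int) (m : Nat)
    (hk : k < m) (hks : k < s.length) :
    pvEncP cnt (s.set k w) m = pvEncP cnt s m + (w - s.getD k 0) * pvR cnt k := by
  unfold pvEncP
  have : ∀ j ∈ Finset.range m, (s.set k w).getD j 0 * pvR cnt j
      = (if j = k then (w - s.getD k 0) * pvR cnt k else 0) + s.getD j 0 * pvR cnt j := by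
    intro j _
    by_cases hj : j = k
    · subst hj
      rw [List.getD_eq_getElem?_getD, List.getElem?_set_self (by omega), List.getD_eq_getElem?_getD]
      simp [List.getElem?_eq_getElem hks]
      ring
    · rw [List.getD_eq_getElem?_getD, List.getElem?_set_ne (by omega), ← List.getD_eq_getElem?_getD]
      simp [hj]
    
  rw [Finset.sum_congr rfl this, Finset.sum_add_distrib]
  rw [Finset.sum_ite_eq_of_mem' _ _ _ (by simpa using hk : k ∈ Finset.range m)]
  ring
theorem pvList_eq_of_getD (a b : List Int) (hl : a.length = b.length)
    (h : ∀ j, a.getD j 0 = b.getD j 0) : a = b := by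
  apply List.ext_getElem hl
  intro j h1 h2
  have := h j
  rwa [List.getD_eq_getElem?_getD, List.getD_eq_getElem?_getD,
    List.getElem?_eq_getElem h1, List.getElem?_eq_getElem h2] at this

-- a digit is determined by the value: q * R + r = q' * R + r' with r, r' ∈ [0, R) forces q = q'
theorem pvDigit_eq (R q q' r r' : Int) (hR : 0 < R) (hr : 0 ≤ r) (hr2 : r < R)
    (hr' : 0 ≤ r') (hr2' : r' < R) (h : q * R + r = q' * R + r') : q = q' := by
  rcases lt_trichotomy q q' with hlt | heq | hgt
  · nlinarith
  · exact heq
  · nlinarith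

theorem pvEncP_inj (cnt : List Int) (hc : ∀ i, 0 ≤ cnt.getD i 0) :
    ∀ (m : Nat), m ≤ cnt.length → ∀ (s s' : List Int),
    (∀ i, 0 ≤ s.getD i 0 ∧ s.getD i 0 ≤ cnt.getD i 0) →
    (∀ i, 0 ≤ s'.getD i 0 ∧ s'.getD i 0 ≤ cnt.getD i 0) →
    pvEncP cnt s m = pvEncP cnt s' m → ∀ j < m, s.getD j 0 = s'.getD j 0 := by
  intro m
  induction m with
  | zero => intro _ s s' _ _ _ j hj; omega
  | succ m ih =>
    intro hm s s' hs hs' heq j hj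
    have hRpos := pvR_pos cnt hc m
    have hlow := pvEncP_lt cnt s hc hs m (by omega)
    have hlow' := pvEncP_lt cnt s' hc hs' m (by omega)
    have hnn := pvEncP_nonneg cnt s hc (fun i => (hs i).1) m
    have hnn' := pvEncP_nonneg cnt s' hc (fun i => (hs' i).1) m
    rw [pvEncP_succ, pvEncP_succ] at heq
    have hdig : s.getD m 0 = s'.getD m 0 := by
      apply pvDigit_eq (pvR cnt m) _ _ (pvEncP cnt s m) (pvEncP cnt s' m) hRpos hnn hlow hnn' hlow'
      linarith
    rcases Nat.lt_succ_iff_lt_or_eq.mp hj with hj' | hj'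
    · refine ih (by omega) s s' hs hs' ?_ j hj'
      rw [hdig] at heq; linarith
    · rw [hj']; exact hdig

theorem pvEncP_zero_digits (cnt s : List Int) (hc : ∀ i, 0 ≤ cnt.getD i 0)
    (hs : ∀ i, 0 ≤ s.getD i 0) (m : Nat) (h : pvEncP cnt s m = 0) :
    ∀ j < m, s.getD j 0 = 0 := by
  induction m with
  | zero => omega
  | succ m ih =>
    rw [pvEncP_succ] at h
    have hRpos := pvR_pos cnt hc m
    have hnn := pvEncP_nonneg cnt s hc hs m
    have hterm : 0 ≤ s.getD m 0 * pvR cnt m := mul_nonneg (hs m) (le_of_lt hRpos)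
    have h1 : pvEncP cnt s m = 0 := by omega
    have h2 : s.getD m 0 = 0 := by nlinarith [hs m]
    intro j hj
    rcases Nat.lt_succ_iff_lt_or_eq.mp hj with hj' | hj'
    · exact ih h1 j hj'
    · rw [hj']; exact h2

-- a positive digit forces the encoded value ≥ its radix weight
theorem pvEncP_ge_R (cnt s : List Int) (hc : ∀ i, 0 ≤ cnt.getD i 0)
    (hs : ∀ i, 0 ≤ s.getD i 0) (m k : Nat) (hk : k < m) (hpos : 0 < s.getD k 0) :
    pvR cnt k ≤ pvEncP cnt s m := by
  unfold pvEncP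
  have h1 : pvR cnt k ≤ s.getD k 0 * pvR cnt k := by
    nlinarith [pvR_pos cnt hc k]
  calc pvR cnt k ≤ s.getD k 0 * pvR cnt k := h1
    _ ≤ ∑ j ∈ Finset.range m, s.getD j 0 * pvR cnt j := by
        apply Finset.single_le_sum (f := fun j => s.getD j 0 * pvR cnt j)
        · intro i _
          exact mul_nonneg (hs i) (le_of_lt (pvR_pos cnt hc i))
        · simpa using hk

-- full vector: enc cnt (w.r.t. itself) = R t - 1 (telescoping)
theorem pvEncP_full (cnt : List Int) (hc : ∀ i, 0 ≤ cnt.getD i 0) (m : Nat) (hm : m ≤ cnt.length) :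
    pvEncP cnt cnt m = pvR cnt m - 1 := by
  induction m with
  | zero => simp [pvEncP, pvR_zero]
  | succ m ih =>
    rw [pvEncP_succ, ih (by omega), pvR_succ cnt m (by omega)]
    ring

-- list sum as a getD sum
theorem pvSum_eq (s : List Int) : s.sum = ∑ j ∈ Finset.range s.length, s.getD j 0 := by
  induction s with
  | nil => simp
  | cons a l ih =>
    rw [List.sum_cons, List.length_cons, Finset.sum_range_succ']
    simp [ih]
    ring

theorem pvSum_le (cnt s : List Int) (hlen : s.length = cnt.length)
    (hs : ∀ i, s.getD i 0 ≤ cnt.getD i 0) : s.sum ≤ cnt.sum := by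
  rw [pvSum_eq, pvSum_eq, hlen]
  exact Finset.sum_le_sum (fun i _ => hs i)

theorem pvSum_set (s : List Int) (k : Nat) (hk : k < s.length) (w : Int) :
    (s.set k w).sum = s.sum + w - s.getD k 0 := by
  have h1 := pvSum_eq (s.set k w)
  rw [List.length_set] at h1
  rw [h1, pvSum_eq]
  have : ∀ j ∈ Finset.range s.length, (s.set k w).getD j 0
      = (if j = k then w - s.getD k 0 else 0) + s.getD j 0 := by
    intro j _
    by_cases hj : j = k
    · subst hj
      rw [List.getD_eq_getElem?_getD, List.getElem?_set_self (by omega), List.getD_eq_getElem?_getD]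
      simp [List.getElem?_eq_getElem hk]
    · rw [List.getD_eq_getElem?_getD, List.getElem?_set_ne (by omega), ← List.getD_eq_getElem?_getD]
      simp [hj]
  rw [Finset.sum_congr rfl this, Finset.sum_add_distrib]
  rw [Finset.sum_ite_eq_of_mem' _ _ _ (by simpa using hk : k ∈ Finset.range s.length)]
  ring

-- sum of toNat-mapped list = toNat of sum, for nonneg entries

theorem pvGetD_set_self (s : List Int) (k : Nat) (w : Int) (hk : k < s.length) :
    (s.set k w).getD k 0 = w := by
  rw [List.getD_eq_getElem?_getD, List.getElem?_set_self hk]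
  simp

theorem pvGetD_set_ne (s : List Int) (k j : Nat) (w : Int) (hkj : j ≠ k) :
    (s.set k w).getD j 0 = s.getD j 0 := by
  rw [List.getD_eq_getElem?_getD, List.getElem?_set_ne (by omega), ← List.getD_eq_getElem?_getD]

theorem pvDecode_aux (cnt : List Int) (hc : ∀ i, 0 ≤ cnt.getD i 0) :
    ∀ (m : Nat), m ≤ cnt.length → ∀ (v : Int) (arr : List Int), arr.length = cnt.length →
    0 ≤ v → v < pvR cnt m →
    ∃ s', (((List.range m).reverse).foldl
      (fun (sv : List Int × Int) i =>
        (sv.1.set i (PySem.Int.floordiv sv.2 ((pvScanMul 1 cnt).getD i 0)),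
         PySem.Int.mod sv.2 ((pvScanMul 1 cnt).getD i 0))) (arr, v)) = (s', 0)
      ∧ s'.length = cnt.length
      ∧ (∀ i, m ≤ i → s'.getD i 0 = arr.getD i 0)
      ∧ (∀ i, i < m → 0 ≤ s'.getD i 0 ∧ s'.getD i 0 ≤ cnt.getD i 0)
      ∧ pvEncP cnt s' m = v := by
  intro m
  induction m with
  | zero =>
    intro _ v arr hlen hv0 hv1
    rw [pvR_zero] at hv1
    have hv : v = 0 := by omega
    exact ⟨arr, by simp [hv], hlen, fun i _ => rfl, fun i hi => by omega, by simp [pvEncP, hv]⟩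
  | succ m ih =>
    intro hm v arr hlen hv0 hv1
    have hR : 0 < pvR cnt m := pvR_pos cnt hc m
    have hscan : (pvScanMul 1 cnt).getD m 0 = pvR cnt m := by
      rw [pvScanMul_getD cnt 1 m (by omega)]; ring
    rw [List.range_succ, List.reverse_append, List.reverse_singleton, List.singleton_append,
      List.foldl_cons]
    set q := PySem.Int.floordiv v ((pvScanMul 1 cnt).getD m 0) with hq
    set r := PySem.Int.mod v ((pvScanMul 1 cnt).getD m 0) with hr
    have hq0 : 0 ≤ q := by
      rw [hq, hscan]
      rw [show (0:Int) = 0 * pvR cnt m by ring] at hv0 ⊢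
      exact (PySem.Int.le_floordiv_iff_mul_le hR).mpr (by linarith)
    have hqc : q ≤ cnt.getD m 0 := by
      have h2 : v < (cnt.getD m 0 + 1) * pvR cnt m := by
        rw [pvR_succ cnt m (by omega)] at hv1; linarith
      have := (PySem.Int.floordiv_lt_iff_lt_mul hR (q := cnt.getD m 0 + 1)).mpr h2
      rw [hq, hscan]; omega
    have hr0 : 0 ≤ r := by rw [hr, hscan]; exact PySem.Int.mod_nonneg _ hR
    have hr1 : r < pvR cnt m := by rw [hr, hscan]; exact PySem.Int.mod_lt _ hR
    have hqr : q * pvR cnt m + r = v := by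
      rw [hq, hr, hscan]; exact PySem.Int.floordiv_mul_add_mod v (pvR cnt m)
    obtain ⟨s', hfold, hslen, habove, hdig, henc⟩ :=
      ih (by omega) r (arr.set m q) (by simpa using hlen) hr0 hr1
    refine ⟨s', hfold, hslen, ?_, ?_, ?_⟩
    · intro i hi
      rw [habove i (by omega), pvGetD_set_ne arr m i q (by omega)]
    · intro i hi
      rcases Nat.lt_succ_iff_lt_or_eq.mp hi with hi' | hi'
      · exact hdig i hi'
      · subst hi'
        rw [habove i (by omega), pvGetD_set_self arr i q (by omega)]
        exact ⟨hq0, hqc⟩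
    · rw [pvEncP_succ, henc, habove m (by omega), pvGetD_set_self arr m q (by omega)]
      linarith


theorem pvMinP_right_comm (a x y : Int × Int) :
    pvMinP (pvMinP a x) y = pvMinP (pvMinP a y) x := by
  rcases a with ⟨a1, a2⟩; rcases x with ⟨x1, x2⟩; rcases y with ⟨y1, y2⟩
  simp only [pvMinP]
  split_ifs <;> first | rfl | (simp only [Prod.mk.injEq]; omega)

theorem pvFoldl_minP_perm (l1 l2 : List (Int × Int)) (h : l1.Perm l2) :
    ∀ a, l1.foldl pvMinP a = l2.foldl pvMinP a := by
  induction h with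
  | nil => intro a; rfl
  | cons x _ ih => intro a; simp only [List.foldl_cons]; exact ih _
  | swap x y l => intro a; simp only [List.foldl_cons]; rw [pvMinP_right_comm]
  | trans _ _ ih1 ih2 => intro a; rw [ih1, ih2]

theorem pvMinP_of_lt (a c : Int × Int) (h : c.1 < a.1) : pvMinP a c = c := by
  simp only [pvMinP]
  split_ifs with h1
  · exfalso; omega
  · rfl

-- foldl keeps a lexicographic lower bound on its first component
theorem pvFoldl_minP_fst_le (l : List (Int × Int)) :
    ∀ a, (l.foldl pvMinP a).1 ≤ a.1 ∧ ∀ c ∈ l, (l.foldl pvMinP a).1 ≤ c.1 := by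
  induction l with
  | nil => intro a; exact ⟨le_refl _, by simp⟩
  | cons c cs ih =>
    intro a
    simp only [List.foldl_cons]
    have h1 := ih (pvMinP a c)
    have h2 : (pvMinP a c).1 ≤ a.1 ∧ (pvMinP a c).1 ≤ c.1 := by
      simp only [pvMinP]; split_ifs <;> omega
    refine ⟨by omega, ?_⟩
    intro e he
    rcases List.mem_cons.mp he with rfl | he'
    · omega
    · exact (h1.2 e he')

-- the fold result is one of the candidates (or the start)


theorem pvOptFold_eq (l : List (Int × Int)) :
    ∀ (r : Int × Int),
      l.foldl (fun (res : Option (Int × Int)) cand =>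
        match res with
        | none => some cand
        | some r => if cand.1 < r.1 ∨ (cand.1 = r.1 ∧ cand.2 < r.2) then some cand
                    else some r) (some r) = some (l.foldl pvMinP r) := by
  induction l with
  | nil => intro r; rfl
  | cons c cs ih =>
    intro r
    simp only [List.foldl_cons]
    have hmin : (if c.1 < r.1 ∨ (c.1 = r.1 ∧ c.2 < r.2) then some c else some r)
        = some (pvMinP r c) := by
      simp only [pvMinP]
      split_ifs <;> first | rfl | (simp only [Option.some.injEq, Prod.mk.injEq]; omega)
    rw [hmin]
    exact ih _

-- partition of a filter over a disjoint disjunction, up to permutation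
theorem pvFilter_or_perm {α : Type} (l : List α) (p q : α → Bool)
    (hdisj : ∀ x ∈ l, ¬(p x = true ∧ q x = true)) :
    (l.filter (fun x => p x || q x)).Perm (l.filter p ++ l.filter q) := by
  induction l with
  | nil => simp
  | cons c cs ih =>
    have ih' := ih (fun x hx => hdisj x (List.mem_cons_of_mem c hx))
    by_cases hp : p c
    · have hq : q c = false := by
        by_contra hcon
        exact hdisj c List.mem_cons_self ⟨hp, by simpa using hcon⟩
      simp only [List.filter_cons, hp, hq, Bool.true_or, if_true, Bool.false_eq_true, if_false]
      simpa using List.Perm.cons c ih'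
    · by_cases hq : q c
      · simp only [List.filter_cons, hq, eq_self_iff_true, Bool.or_true, if_true]
        have hp' : p c = false := by simpa using hp
        simp only [hp', Bool.false_eq_true, if_false]
        refine List.Perm.trans (List.Perm.cons c ih') ?_
        exact (List.perm_middle).symm
      · have hp' : p c = false := by simpa using hp
        have hq' : q c = false := by simpa using hq
        simp only [List.filter_cons, hp', hq', Bool.false_or, Bool.false_eq_true, if_false]
        exact ih'


def pvBestV (prm : List Int) (lim : Int) (s : List Int) : Int × Int :=
  pvBest prm lim ((s.map Int.toNat).sum) s

def pvStep (prm : List Int) (lim : Int) (k : Nat) (bf : Int × Int) : Int × Int :=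
  if bf.2 * prm.getD k 0 ≤ lim then (bf.1, bf.2 * prm.getD k 0) else (bf.1 + 1, prm.getD k 0)

def pvCand (prm : List Int) (lim : Int) (u : List Int) (k : Nat) : Int × Int :=
  pvStep prm lim k (pvBestV prm lim (u.set k (u.getD k 0 - 1)))

theorem pvFoldl_skip' {α β : Type} (l : List α) (p : α → Bool) (f : β → α → β) :
    ∀ a, l.foldl (fun acc x => if p x then acc else f acc x) a
      = (l.filter (fun x => !p x)).foldl f a := by
  induction l with
  | nil => intro a; rfl
  | cons c cs ih =>
    intro a
    by_cases h : p c <;> simp [List.foldl_cons, List.filter_cons, h, ih]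

theorem pvSumToNat_set (u : List Int) : ∀ (k : Nat), k < u.length → 0 < u.getD k 0 →
    ((u.set k (u.getD k 0 - 1)).map Int.toNat).sum + 1 = (u.map Int.toNat).sum := by
  induction u with
  | nil => intro k h; simp at h
  | cons a l ih =>
    intro k hk hpos
    cases k with
    | zero =>
      simp only [List.getD_cons_zero] at hpos
      simp only [List.set_cons_zero, List.map_cons, List.sum_cons, List.getD_cons_zero]
      omega
    | succ k =>
      simp only [List.getD_cons_succ] at hpos
      simp only [List.set_cons_succ, List.map_cons, List.sum_cons, List.getD_cons_succ]
      have := ih k (by simpa using hk) hpos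
      omega

theorem pvAllZero_sum (u : List Int) (h : u.all (fun v => v == 0) = true) :
    (u.map Int.toNat).sum = 0 := by
  rw [List.all_eq_true] at h
  apply List.sum_eq_zero
  intro x hx
  rcases List.mem_map.mp hx with ⟨v, hv, rfl⟩
  have := h v hv
  simp at this
  omega

theorem pvBestV_zero (prm : List Int) (lim : Int) (u : List Int)
    (h : u.all (fun v => v == 0) = true) : pvBestV prm lim u = (1, 1) := by
  unfold pvBestV
  rw [pvAllZero_sum u h]
  rfl

theorem pvFoldl_optmap (ks : List Nat) (F : Nat → Int × Int) :
    ∀ (a : Option (Int × Int)), ks.foldl (fun res k =>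
        match res with
        | none => some (F k)
        | some r => if (F k).1 < r.1 ∨ ((F k).1 = r.1 ∧ (F k).2 < r.2) then some (F k)
                    else some r) a
      = (ks.map F).foldl (fun res cand =>
        match res with
        | none => some cand
        | some r => if cand.1 < r.1 ∨ (cand.1 = r.1 ∧ cand.2 < r.2) then some cand
                    else some r) a := by
  induction ks with
  | nil => intro a; rfl
  | cons k ks ih => intro a; simp only [List.foldl_cons, List.map_cons]; exact ih _

theorem pvBestV_rec (prm : List Int) (lim : Int) (u : List Int)
    (hs : ∀ i, 0 ≤ u.getD i 0) (hnz : u.all (fun v => v == 0) = false) :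
    ∀ c cs, ((List.range u.length).filter (fun k => !(u.getD k 0 == 0))).map (pvCand prm lim u)
      = c :: cs → pvBestV prm lim u = cs.foldl pvMinP c := by
  intro c cs hL
  have hex : ∃ v ∈ u, v ≠ 0 := by
    rcases List.all_eq_false.mp hnz with ⟨v, hv, hne⟩
    exact ⟨v, hv, by simpa using hne⟩
  have hsum : (u.map Int.toNat).sum ≠ 0 := by
    rcases hex with ⟨v, hv, hne⟩
    have h0 : 0 ≤ v := by
      rcases List.mem_iff_getElem.mp hv with ⟨i, hi, rfl⟩
      have := hs i
      rwa [List.getD_eq_getElem?_getD, List.getElem?_eq_getElem hi] at this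
    intro hc
    have : v.toNat = 0 := List.sum_eq_zero_iff.mp hc _ (List.mem_map_of_mem hv)
    omega
  obtain ⟨f, hf⟩ : ∃ f, (u.map Int.toNat).sum = f + 1 :=
    ⟨(u.map Int.toNat).sum - 1, by omega⟩
  unfold pvBestV
  rw [hf]
  show (if u.all (fun v => v == 0) then ((1:Int),(1:Int)) else _) = _
  rw [if_neg (by simp [hnz])]
  have hskip := pvFoldl_skip' (List.range u.length) (fun k => u.getD k 0 == 0)
    (fun (res : Option (Int × Int)) k =>
      let bf := pvBest prm lim f (u.set k (u.getD k 0 - 1))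
      let cand := if bf.2 * prm.getD k 0 ≤ lim then (bf.1, bf.2 * prm.getD k 0)
                  else (bf.1 + 1, prm.getD k 0)
      match res with
      | none => some cand
      | some r => if cand.1 < r.1 ∨ (cand.1 = r.1 ∧ cand.2 < r.2) then some cand
                  else some r) none
  rw [hskip]
  have hcongr : ((List.range u.length).filter (fun k => !(u.getD k 0 == 0))).foldl
      (fun (res : Option (Int × Int)) k =>
        let bf := pvBest prm lim f (u.set k (u.getD k 0 - 1))
        let cand := if bf.2 * prm.getD k 0 ≤ lim then (bf.1, bf.2 * prm.getD k 0)
                    else (bf.1 + 1, prm.getD k 0)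
        match res with
        | none => some cand
        | some r => if cand.1 < r.1 ∨ (cand.1 = r.1 ∧ cand.2 < r.2) then some cand
                    else some r) none
      = ((List.range u.length).filter (fun k => !(u.getD k 0 == 0))).foldl
      (fun (res : Option (Int × Int)) k =>
        match res with
        | none => some (pvCand prm lim u k)
        | some r => if (pvCand prm lim u k).1 < r.1 ∨
              ((pvCand prm lim u k).1 = r.1 ∧ (pvCand prm lim u k).2 < r.2)
            then some (pvCand prm lim u k) else some r) none := by
    apply PySem.List.foldl_congr_mem
    intro acc k hk
    have hkr : k ∈ List.range u.length := List.mem_of_mem_filter hk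
    have hklt : k < u.length := List.mem_range.mp hkr
    have hkne : u.getD k 0 ≠ 0 := by
      have := List.of_mem_filter hk
      simpa using this
    have hkpos : 0 < u.getD k 0 := by have := hs k; omega
    have hfuel : f = ((u.set k (u.getD k 0 - 1)).map Int.toNat).sum := by
      have := pvSumToNat_set u k hklt hkpos
      omega
    simp only [pvCand, pvStep, pvBestV, ← hfuel]
  rw [hcongr]
  rw [pvFoldl_optmap _ (pvCand prm lim u) none, hL]
  simp only [List.foldl_cons]
  rw [pvOptFold_eq]
  rfl
theorem pvStep_fst_le (prm : List Int) (lim : Int) (k : Nat) (bf : Int × Int) :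
    (pvStep prm lim k bf).1 ≤ bf.1 + 1 := by
  unfold pvStep; split_ifs <;> simp

theorem pvIndex_of_not_all_zero (u : List Int) (hnz : u.all (fun v => v == 0) = false) :
    ∃ i, i < u.length ∧ u.getD i 0 ≠ 0 := by
  rcases List.all_eq_false.mp hnz with ⟨v, hv, hne⟩
  rcases List.mem_iff_getElem.mp hv with ⟨i, hi, rfl⟩
  refine ⟨i, hi, ?_⟩
  rw [List.getD_eq_getElem?_getD, List.getElem?_eq_getElem hi]
  simpa using hne

theorem pvCand_fst_le (prm : List Int) (lim : Int)
    (hprm : ∀ j, j < prm.length → prm.getD j 0 ≤ lim) :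
    ∀ (n : Nat) (u : List Int), (u.map Int.toNat).sum = n → u.length = prm.length →
    (∀ i, 0 ≤ u.getD i 0) → ∀ k, k < prm.length →
    (pvStep prm lim k (pvBestV prm lim u)).1 ≤ u.sum + 1 := by
  intro n
  induction n using Nat.strong_induction_on with
  | _ n ih =>
    intro u hn hlen hs k hk
    by_cases hz : u.all (fun v => v == 0)
    · have hsum0 : u.sum = 0 := by
        apply List.sum_eq_zero
        intro x hx
        have := List.all_eq_true.mp hz x hx
        simpa using this
      rw [pvBestV_zero prm lim u hz, hsum0]
      unfold pvStep
      rw [if_pos (by rw [one_mul]; exact hprm k hk)]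
      norm_num
    · have hnz : u.all (fun v => v == 0) = false := by simpa using hz
      obtain ⟨i0, hi0, hne0⟩ := pvIndex_of_not_all_zero u hnz
      have hk0mem : i0 ∈ (List.range u.length).filter (fun j => !(u.getD j 0 == 0)) := by
        rw [List.mem_filter]
        exact ⟨List.mem_range.mpr hi0, by simpa using hne0⟩
      have hLmem : pvCand prm lim u i0 ∈
          ((List.range u.length).filter (fun j => !(u.getD j 0 == 0))).map (pvCand prm lim u) :=
        List.mem_map_of_mem hk0mem
      rcases hL : ((List.range u.length).filter (fun j => !(u.getD j 0 == 0))).map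
          (pvCand prm lim u) with _ | ⟨c, cs⟩
      · rw [hL] at hLmem; simp at hLmem
      · have hrec := pvBestV_rec prm lim u hs hnz c cs hL
        -- every candidate's bin count is at most u.sum
        have hband : ∀ e ∈ c :: cs, e.1 ≤ u.sum := by
          intro e he
          rw [← hL] at he
          rcases List.mem_map.mp he with ⟨j, hjmem, rfl⟩
          have hjlt : j < u.length := List.mem_range.mp (List.mem_of_mem_filter hjmem)
          have hjne : u.getD j 0 ≠ 0 := by simpa using List.of_mem_filter hjmem
          have hjpos : 0 < u.getD j 0 := by have := hs j; omega
          have hsub := pvSumToNat_set u j hjlt hjpos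
          have hnpos : 0 < n := by omega
          have hvlen : (u.set j (u.getD j 0 - 1)).length = prm.length := by
            rw [List.length_set]; exact hlen
          have hvnn : ∀ i, 0 ≤ (u.set j (u.getD j 0 - 1)).getD i 0 := by
            intro i
            by_cases hij : i = j
            · subst hij; rw [pvGetD_set_self u i _ hjlt]; omega
            · rw [pvGetD_set_ne u j i _ hij]; exact hs i
          have hIH := ih (n - 1) (by omega) (u.set j (u.getD j 0 - 1)) (by omega) hvlen hvnn
            j (by omega)
          have hvsum : (u.set j (u.getD j 0 - 1)).sum = u.sum - 1 := by
            rw [pvSum_set u j hjlt]; ring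
          unfold pvCand
          rw [hvsum] at hIH
          calc (pvStep prm lim j (pvBestV prm lim (u.set j (u.getD j 0 - 1)))).1
              ≤ (u.sum - 1) + 1 := hIH
            _ ≤ u.sum := by omega
        have hfold := pvFoldl_minP_fst_le cs c
        have hBle : (pvBestV prm lim u).1 ≤ u.sum := by
          rw [hrec]
          have hc := hband c List.mem_cons_self
          omega
        calc (pvStep prm lim k (pvBestV prm lim u)).1
            ≤ (pvBestV prm lim u).1 + 1 := pvStep_fst_le prm lim k _
          _ ≤ u.sum + 1 := by omega
theorem pvFoldl_inv {α β : Type} (l : List α) (f : β → α → β) (P : β → Prop)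
    (h : ∀ b a, P b → P (f b a)) : ∀ b, P b → P (l.foldl f b) := by
  induction l with
  | nil => intro b hb; exact hb
  | cons c cs ih => intro b hb; exact ih _ (h b c hb)

theorem pvModify_inv (res : PySem.Dict Int Int) (k : Int)
    (h : res.keys.Nodup ∧ ∀ j, 0 ≤ res.getD j 0) :
    (res.modify k 0 (· + 1)).keys.Nodup ∧ ∀ j, 0 ≤ (res.modify k 0 (· + 1)).getD j 0 := by
  constructor
  · rw [PySem.Dict.keys_modify]
    exact PySem.Dict.nodup_keys_insert _ _ _ h.1
  · intro j
    rw [PySem.Dict.getD_modify]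
    split_ifs
    · have := h.2 k; omega
    · exact h.2 j

theorem pvDivOut_inv (d : Int) (fuel : Nat) : ∀ (n : Int) (res : PySem.Dict Int Int),
    (res.keys.Nodup ∧ ∀ j, 0 ≤ res.getD j 0) →
    ((pvDivOut d fuel n res).1.keys.Nodup ∧ ∀ j, 0 ≤ (pvDivOut d fuel n res).1.getD j 0) := by
  induction fuel with
  | zero => intro n res h; exact h
  | succ f ih =>
    intro n res h
    simp only [pvDivOut]
    split
    · exact ih _ _ (pvModify_inv res d h)
    · exact h

theorem pvPF_inv (x : Int) :
    (pvPrimeFactors x).keys.Nodup ∧ ∀ j, 0 ≤ (pvPrimeFactors x).getD j 0 := by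
  simp only [pvPrimeFactors]
  have h0 : (PySem.Dict.empty : PySem.Dict Int Int).keys.Nodup ∧
      ∀ j, 0 ≤ (PySem.Dict.empty : PySem.Dict Int Int).getD j 0 := by
    constructor
    · exact PySem.Dict.nodup_keys_empty
    · intro j; rw [PySem.Dict.getD_empty]
  have h1 := pvDivOut_inv 2 (x.natAbs + 1) x PySem.Dict.empty h0
  have h2 := pvFoldl_inv (PySem.List.pyRange 3 (((Int.toNat (pvDivOut 2 (x.natAbs + 1) x PySem.Dict.empty).2).sqrt : Int) + 1) 2)
    (fun (st : PySem.Dict Int Int × Int) dv => pvDivOut dv (st.2.natAbs + 1) st.2 st.1)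
    (fun st => st.1.keys.Nodup ∧ ∀ j, 0 ≤ st.1.getD j 0)
    (fun b a hb => pvDivOut_inv a (b.2.natAbs + 1) b.2 b.1 hb)
    _ h1
  split
  · exact pvModify_inv _ _ h2
  · exact h2

theorem pvPF_values_nonneg (x : Int) : ∀ v ∈ (pvPrimeFactors x).values, 0 ≤ v := by
  intro v hv
  have hnd := (pvPF_inv x).1
  have hval := (pvPF_inv x).2
  rcases List.mem_map.mp hv with ⟨p, hp, rfl⟩
  have := PySem.Dict.getD_of_mem_items (pvPrimeFactors x)
    (k := p.1) (v := p.2) (by simpa using hp) hnd 0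
  rw [← this]
  exact hval p.1


theorem pvPyGetD_set (dp : List (Int × Int)) (nt : Nat) (hnt : nt < dp.length) (j : Int)
    (hj0 : 0 ≤ j) (hjr : j < (dp.length : Int)) (v : Int × Int) :
    PySem.List.pyGetD (dp.set nt v) j (0, 0) =
      if j = (nt : Int) then v else PySem.List.pyGetD dp j (0, 0) := by
  rw [PySem.List.pyGetD_eq_getElem _ _ hj0 (by simpa using hjr),
    PySem.List.pyGetD_eq_getElem _ _ hj0 hjr]
  rw [List.getElem_set]
  split_ifs with h1 h2 h2
  · rfl
  · exfalso; omega
  · exfalso; omega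
  · rfl

theorem pvInner_fold (prm cnt : List Int) (lim : Int) (m b f : Int) (s : List Int)
    (hc : ∀ i, 0 ≤ cnt.getD i 0)
    (hm0 : 0 ≤ m)
    (hslen : s.length = cnt.length)
    (hsval : ∀ i, 0 ≤ s.getD i 0 ∧ s.getD i 0 ≤ cnt.getD i 0)
    (hsenc : pvEncP cnt s cnt.length = m) :
    ∀ (ks : List Nat), (∀ k ∈ ks, k < cnt.length) →
    ∀ (dp : List (Int × Int)), dp.length = (pvR cnt cnt.length).toNat →
    (ks.foldl (fun dp k =>
        if s.getD k 0 == cnt.getD k 0 then dp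
        else
          let cand := if f * prm.getD k 0 ≤ lim then (b, f * prm.getD k 0)
                      else (b + 1, prm.getD k 0)
          let nxt := m + (pvScanMul 1 cnt).getD k 0
          PySem.List.pySetD dp nxt (pvMinP (PySem.List.pyGetD dp nxt (0, 0)) cand)) dp).length
        = dp.length
    ∧ ∀ (j : Int), 0 ≤ j → j < pvR cnt cnt.length →
      PySem.List.pyGetD (ks.foldl (fun dp k =>
        if s.getD k 0 == cnt.getD k 0 then dp
        else
          let cand := if f * prm.getD k 0 ≤ lim then (b, f * prm.getD k 0)
                      else (b + 1, prm.getD k 0)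
          let nxt := m + (pvScanMul 1 cnt).getD k 0
          PySem.List.pySetD dp nxt (pvMinP (PySem.List.pyGetD dp nxt (0, 0)) cand)) dp) j (0, 0)
      = ((ks.filter (fun k => !(s.getD k 0 == cnt.getD k 0) && decide (m + pvR cnt k = j))).map
          (fun k => pvStep prm lim k (b, f))).foldl pvMinP (PySem.List.pyGetD dp j (0, 0)) := by
  intro ks
  induction ks with
  | nil => intro _ dp hdp; exact ⟨rfl, fun j _ _ => rfl⟩
  | cons k ks ih =>
    intro hks dp hdp
    have hklt : k < cnt.length := hks k List.mem_cons_self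
    have hks' : ∀ k' ∈ ks, k' < cnt.length := fun k' hk' => hks k' (List.mem_cons_of_mem k hk')
    rw [List.foldl_cons]
    by_cases hskip : s.getD k 0 == cnt.getD k 0
    · rw [if_pos hskip]
      obtain ⟨ihlen, ihget⟩ := ih hks' dp hdp
      refine ⟨ihlen, ?_⟩
      intro j hj0 hjN
      rw [ihget j hj0 hjN, List.filter_cons]
      rw [show (!(s.getD k 0 == cnt.getD k 0) && decide (m + pvR cnt k = j)) = false by
        rw [hskip]; rfl]
      simp only [Bool.false_eq_true, if_false]
    · rw [if_neg hskip]
      have hne : s.getD k 0 ≠ cnt.getD k 0 := by simpa using hskip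
      have hlt : s.getD k 0 < cnt.getD k 0 := by have := (hsval k).2; omega
      have hscan : (pvScanMul 1 cnt).getD k 0 = pvR cnt k := by
        rw [pvScanMul_getD cnt 1 k (by omega)]; ring
      have hRpos := pvR_pos cnt hc k
      have hencs : pvEncP cnt (s.set k (s.getD k 0 + 1)) cnt.length
          = m + (pvScanMul 1 cnt).getD k 0 := by
        rw [pvEncP_set cnt s k _ cnt.length hklt (by omega), hsenc, hscan]; ring
      have hval' : ∀ i, 0 ≤ (s.set k (s.getD k 0 + 1)).getD i 0 ∧
          (s.set k (s.getD k 0 + 1)).getD i 0 ≤ cnt.getD i 0 := by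
        intro i
        by_cases hik : i = k
        · subst hik; rw [pvGetD_set_self s i _ (by omega)]
          exact ⟨by have := (hsval i).1; omega, by omega⟩
        · rw [pvGetD_set_ne s k i _ hik]; exact hsval i
      have hnxt0 : 0 ≤ m + (pvScanMul 1 cnt).getD k 0 := by rw [hscan]; omega
      have hnxtN : m + (pvScanMul 1 cnt).getD k 0 < pvR cnt cnt.length := by
        rw [← hencs]
        exact pvEncP_lt cnt _ hc hval' cnt.length (le_refl _)
      have hnts : (m + (pvScanMul 1 cnt).getD k 0).toNat < dp.length := by omega
      have hset : PySem.List.pySetD dp (m + (pvScanMul 1 cnt).getD k 0)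
          (pvMinP (PySem.List.pyGetD dp (m + (pvScanMul 1 cnt).getD k 0) (0, 0))
            (if f * prm.getD k 0 ≤ lim then (b, f * prm.getD k 0) else (b + 1, prm.getD k 0)))
          = dp.set (m + (pvScanMul 1 cnt).getD k 0).toNat
              (pvMinP (PySem.List.pyGetD dp (m + (pvScanMul 1 cnt).getD k 0) (0, 0))
                (pvStep prm lim k (b, f))) := by
        rw [PySem.List.pySetD_of_nonneg _ _ hnxt0]; rfl
      show ((ks.foldl _ (PySem.List.pySetD dp _ _)).length = dp.length) ∧ _
      rw [hset]
      obtain ⟨ihlen, ihget⟩ := ih hks' (dp.set (m + (pvScanMul 1 cnt).getD k 0).toNat _)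
        (by simpa using hdp)
      constructor
      · rw [ihlen]; simp
      · intro j hj0 hjN
        rw [ihget j hj0 hjN]
        rw [pvPyGetD_set dp (m + (pvScanMul 1 cnt).getD k 0).toNat hnts j hj0 (by omega) _]
        rw [List.filter_cons]
        by_cases hjn : j = m + (pvScanMul 1 cnt).getD k 0
        · rw [if_pos (by omega)]
          rw [show (!(s.getD k 0 == cnt.getD k 0) && decide (m + pvR cnt k = j)) = true by
            have hje : m + pvR cnt k = j := by rw [hjn, hscan]
            simp only [Bool.and_eq_true, Bool.not_eq_true', beq_eq_false_iff_ne, ne_eq,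
              decide_eq_true_eq]
            exact ⟨hne, hje⟩]
          simp only [if_true, List.map_cons, List.foldl_cons]
          rw [show PySem.List.pyGetD dp (m + (pvScanMul 1 cnt).getD k 0) (0, 0)
              = PySem.List.pyGetD dp j (0, 0) by rw [hjn]]
        · rw [if_neg (by omega)]
          rw [show (!(s.getD k 0 == cnt.getD k 0) && decide (m + pvR cnt k = j)) = false by
            have hje : m + pvR cnt k ≠ j := by rw [← hscan]; omega
            simp [hje]]
          simp only [Bool.false_eq_true, if_false]

theorem pvInner_spec (prm cnt : List Int) (lim : Int) (m b f : Int) (s : List Int)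
    (hc : ∀ i, 0 ≤ cnt.getD i 0)
    (hm0 : 0 ≤ m)
    (hslen : s.length = cnt.length)
    (hsval : ∀ i, 0 ≤ s.getD i 0 ∧ s.getD i 0 ≤ cnt.getD i 0)
    (hsenc : pvEncP cnt s cnt.length = m)
    (dp : List (Int × Int)) (hdp : dp.length = (pvR cnt cnt.length).toNat) :
    (pvInner prm cnt (pvScanMul 1 cnt) lim cnt.length m b f s dp).length = dp.length
    ∧ ∀ (j : Int), 0 ≤ j → j < pvR cnt cnt.length →
      PySem.List.pyGetD (pvInner prm cnt (pvScanMul 1 cnt) lim cnt.length m b f s dp) j (0, 0)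
      = (((List.range cnt.length).filter
            (fun k => !(s.getD k 0 == cnt.getD k 0) && decide (m + pvR cnt k = j))).map
          (fun k => pvStep prm lim k (b, f))).foldl pvMinP (PySem.List.pyGetD dp j (0, 0)) := by
  unfold pvInner
  exact pvInner_fold prm cnt lim m b f s hc hm0 hslen hsval hsenc (List.range cnt.length)
    (fun k hk => List.mem_range.mp hk) dp hdp
def pvDecF (cnt : List Int) (j : Int) : List Int :=
  (pvDecode (pvScanMul 1 cnt) cnt.length j).1

theorem pvGetD_oob (l : List Int) (i : Nat) (h : l.length ≤ i) : l.getD i 0 = 0 := by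
  rw [List.getD_eq_getElem?_getD, List.getElem?_eq_none (by omega)]
  rfl

theorem pvDecF_spec (cnt : List Int) (hc : ∀ i, 0 ≤ cnt.getD i 0) (j : Int)
    (h0 : 0 ≤ j) (h1 : j < pvR cnt cnt.length) :
    (pvDecF cnt j).length = cnt.length
    ∧ (∀ i, 0 ≤ (pvDecF cnt j).getD i 0 ∧ (pvDecF cnt j).getD i 0 ≤ cnt.getD i 0)
    ∧ pvEncP cnt (pvDecF cnt j) cnt.length = j := by
  obtain ⟨s', hfold, hslen, _, hdig, henc⟩ := pvDecode_aux cnt hc cnt.length (le_refl _) j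
    (List.replicate cnt.length (0 : Int)) (by simp) h0 h1
  have hres : pvDecF cnt j = s' := by
    unfold pvDecF pvDecode
    rw [hfold]
  rw [hres]
  refine ⟨hslen, ?_, henc⟩
  intro i
  by_cases hi : i < cnt.length
  · exact hdig i hi
  · rw [pvGetD_oob s' i (by omega), pvGetD_oob cnt i (by omega)]
    omega

theorem pvDec_of_enc (cnt : List Int) (hc : ∀ i, 0 ≤ cnt.getD i 0) (s : List Int)
    (hslen : s.length = cnt.length)
    (hsval : ∀ i, 0 ≤ s.getD i 0 ∧ s.getD i 0 ≤ cnt.getD i 0) :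
    pvDecF cnt (pvEncP cnt s cnt.length) = s := by
  have h0 : 0 ≤ pvEncP cnt s cnt.length := pvEncP_nonneg cnt s hc (fun i => (hsval i).1) _
  have h1 : pvEncP cnt s cnt.length < pvR cnt cnt.length :=
    pvEncP_lt cnt s hc hsval cnt.length (le_refl _)
  obtain ⟨hulen, huval, huenc⟩ := pvDecF_spec cnt hc _ h0 h1
  apply pvList_eq_of_getD _ _ (by omega)
  intro i
  by_cases hi : i < cnt.length
  · exact pvEncP_inj cnt hc cnt.length (le_refl _) _ s huval hsval huenc i hi
  · rw [pvGetD_oob _ i (by omega), pvGetD_oob s i (by omega)]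

def pvCandsP (prm cnt : List Int) (lim : Int) (j m : Int) : List (Int × Int) :=
  ((List.range cnt.length).filter (fun k =>
    decide (0 < (pvDecF cnt j).getD k 0) && decide (j - pvR cnt k < m))).map
    (pvCand prm lim (pvDecF cnt j))

def pvInitP (cnt : List Int) (j : Int) : Int × Int := if j = 0 then (1, 1) else (cnt.sum + 1, 1)

theorem pvState (prm cnt : List Int) (lim : Int)
    (hlen : prm.length = cnt.length) (hc : ∀ i, 0 ≤ cnt.getD i 0)
    (hprm : ∀ i, i < prm.length → prm.getD i 0 ≤ lim) (j m' : Int)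
    (h0 : 0 ≤ j) (h1 : j < pvR cnt cnt.length) (hjm : j ≤ m') :
    List.foldl pvMinP (pvInitP cnt j) (pvCandsP prm cnt lim j m')
      = pvBestV prm lim (pvDecF cnt j) := by
  obtain ⟨hulen, huval, huenc⟩ := pvDecF_spec cnt hc j h0 h1
  by_cases hj0 : j = 0
  · subst hj0
    have hz : ∀ i, i < cnt.length → (pvDecF cnt 0).getD i 0 = 0 :=
      pvEncP_zero_digits cnt _ hc (fun i => (huval i).1) cnt.length huenc
    have hfilter : ((List.range cnt.length).filter (fun k =>
        decide (0 < (pvDecF cnt 0).getD k 0) && decide ((0:Int) - pvR cnt k < m'))) = [] := by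
      apply List.filter_eq_nil_iff.mpr
      intro k hk
      rw [hz k (List.mem_range.mp hk)]
      simp
    have hall : (pvDecF cnt 0).all (fun v => v == 0) = true := by
      rw [List.all_eq_true]
      intro v hv
      rcases List.mem_iff_getElem.mp hv with ⟨i, hi, rfl⟩
      have := hz i (by omega)
      rw [List.getD_eq_getElem?_getD, List.getElem?_eq_getElem hi] at this
      simpa using this
    rw [pvBestV_zero prm lim _ hall]
    unfold pvCandsP
    rw [hfilter]
    rfl
  · have hjpos : 0 < j := by omega
    have hnz : (pvDecF cnt j).all (fun v => v == 0) = false := by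
      by_contra hcon
      have hall : (pvDecF cnt j).all (fun v => v == 0) = true := by
        rcases Bool.eq_false_or_eq_true ((pvDecF cnt j).all (fun v => v == 0)) with h | h
        · exact h
        · exact absurd h hcon
      have : pvEncP cnt (pvDecF cnt j) cnt.length = 0 := by
        unfold pvEncP
        apply Finset.sum_eq_zero
        intro i hi
        have hilen : i < cnt.length := by simpa using hi
        have hiu : i < (pvDecF cnt j).length := by omega
        have := List.all_eq_true.mp hall ((pvDecF cnt j)[i])
          (List.getElem_mem hiu)
        rw [List.getD_eq_getElem?_getD, List.getElem?_eq_getElem hiu]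
        simp at this
        simp [this]
      omega
    have hfc : ((List.range cnt.length).filter (fun k =>
          decide (0 < (pvDecF cnt j).getD k 0) && decide (j - pvR cnt k < m')))
        = ((List.range (pvDecF cnt j).length).filter (fun k => !((pvDecF cnt j).getD k 0 == 0))) := by
      rw [hulen]
      apply List.filter_congr
      intro k hk
      have hRpos := pvR_pos cnt hc k
      by_cases hzk : (pvDecF cnt j).getD k 0 = 0
      · have hd1 : decide (0 < (pvDecF cnt j).getD k 0) = false := by
          simp only [decide_eq_false_iff_not]; omega
        have hd3 : (!((pvDecF cnt j).getD k 0 == 0)) = false := by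
          simp only [Bool.not_eq_false', beq_iff_eq]; exact hzk
        rw [hd1, hd3, Bool.false_and]
      · have hpos : 0 < (pvDecF cnt j).getD k 0 := by have := (huval k).1; omega
        simp only [hpos, decide_true, Bool.true_and]
        rw [show (!((pvDecF cnt j).getD k 0 == 0)) = true by simpa using hzk]
        simp only [decide_eq_true_eq]
        omega
    unfold pvCandsP
    rw [hfc]
    obtain ⟨i0, hi0lt, hi0ne⟩ := pvIndex_of_not_all_zero _ hnz
    have hmem : pvCand prm lim (pvDecF cnt j) i0 ∈
        ((List.range (pvDecF cnt j).length).filter (fun k => !((pvDecF cnt j).getD k 0 == 0))).map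
          (pvCand prm lim (pvDecF cnt j)) := by
      apply List.mem_map_of_mem
      rw [List.mem_filter]
      exact ⟨List.mem_range.mpr hi0lt, by simpa using hi0ne⟩
    rcases hL : ((List.range (pvDecF cnt j).length).filter
        (fun k => !((pvDecF cnt j).getD k 0 == 0))).map (pvCand prm lim (pvDecF cnt j))
      with _ | ⟨c, cs⟩
    · rw [hL] at hmem; simp at hmem
    · have hrec := pvBestV_rec prm lim (pvDecF cnt j) (fun i => (huval i).1) hnz c cs hL
      rw [hrec, List.foldl_cons]
      congr 1
      -- the sentinel loses to the first real candidate
      have hcmem : c ∈ c :: cs := List.mem_cons_self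
      rw [← hL] at hcmem
      rcases List.mem_map.mp hcmem with ⟨kc, hkcmem, hkc⟩
      have hkclt : kc < (pvDecF cnt j).length := List.mem_range.mp (List.mem_of_mem_filter hkcmem)
      have hkcne : (pvDecF cnt j).getD kc 0 ≠ 0 := by simpa using List.of_mem_filter hkcmem
      have hkcpos : 0 < (pvDecF cnt j).getD kc 0 := by have := (huval kc).1; omega
      have hvlen : ((pvDecF cnt j).set kc ((pvDecF cnt j).getD kc 0 - 1)).length = prm.length := by
        rw [List.length_set]; omega
      have hvnn : ∀ i, 0 ≤ ((pvDecF cnt j).set kc ((pvDecF cnt j).getD kc 0 - 1)).getD i 0 := by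
        intro i
        by_cases hik : i = kc
        · subst hik; rw [pvGetD_set_self _ i _ hkclt]; omega
        · rw [pvGetD_set_ne _ kc i _ hik]; exact (huval i).1
      have hbound := pvCand_fst_le prm lim hprm _ _ rfl hvlen hvnn kc (by omega)
      have hvsum : ((pvDecF cnt j).set kc ((pvDecF cnt j).getD kc 0 - 1)).sum
          = (pvDecF cnt j).sum - 1 := by
        rw [pvSum_set _ kc hkclt]; ring
      have hsumle : (pvDecF cnt j).sum ≤ cnt.sum :=
        pvSum_le cnt _ hulen (fun i => (huval i).2)
      have hcfst : c.1 ≤ cnt.sum := by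
        rw [← hkc]
        unfold pvCand
        calc (pvStep prm lim kc (pvBestV prm lim _)).1
            ≤ ((pvDecF cnt j).set kc ((pvDecF cnt j).getD kc 0 - 1)).sum + 1 := hbound
          _ = (pvDecF cnt j).sum := by rw [hvsum]; ring
          _ ≤ cnt.sum := hsumle
      unfold pvInitP
      rw [if_neg hj0]
      apply pvMinP_of_lt
      simp only
      omega
theorem pvDecide_lt_succ (a b : Int) : decide (a < b + 1) = (decide (a < b) || decide (a = b)) := by
  by_cases h1 : a < b
  · simp [h1]; omega
  · by_cases h2 : a = b <;> simp [h1, h2] <;> omega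

theorem pvEdge (prm cnt : List Int) (lim : Int) (hc : ∀ i, 0 ≤ cnt.getD i 0)
    (m j : Int) (hm0 : 0 ≤ m) (hmN : m < pvR cnt cnt.length)
    (hj0 : 0 ≤ j) (hjN : j < pvR cnt cnt.length) (k : Nat) (hk : k < cnt.length) :
    ((0 < (pvDecF cnt j).getD k 0 ∧ j - pvR cnt k = m) ↔
      ((pvDecF cnt m).getD k 0 ≠ cnt.getD k 0 ∧ m + pvR cnt k = j))
    ∧ ((0 < (pvDecF cnt j).getD k 0 ∧ j - pvR cnt k = m) →
      (pvDecF cnt j).set k ((pvDecF cnt j).getD k 0 - 1) = pvDecF cnt m) := by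
  obtain ⟨hulen, huval, huenc⟩ := pvDecF_spec cnt hc j hj0 hjN
  obtain ⟨hslen, hsval, hsenc⟩ := pvDecF_spec cnt hc m hm0 hmN
  have hfwd : (0 < (pvDecF cnt j).getD k 0 ∧ j - pvR cnt k = m) →
      (pvDecF cnt j).set k ((pvDecF cnt j).getD k 0 - 1) = pvDecF cnt m
      ∧ (pvDecF cnt m).getD k 0 ≠ cnt.getD k 0 ∧ m + pvR cnt k = j := by
    rintro ⟨hpos, hjm⟩
    have hkv : k < (pvDecF cnt j).length := by omega
    have hvval : ∀ i, 0 ≤ ((pvDecF cnt j).set k ((pvDecF cnt j).getD k 0 - 1)).getD i 0 ∧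
        ((pvDecF cnt j).set k ((pvDecF cnt j).getD k 0 - 1)).getD i 0 ≤ cnt.getD i 0 := by
      intro i
      by_cases hik : i = k
      · subst hik
        rw [pvGetD_set_self _ i _ hkv]
        have := (huval i).2
        omega
      · rw [pvGetD_set_ne _ k i _ hik]; exact huval i
    have hvenc : pvEncP cnt ((pvDecF cnt j).set k ((pvDecF cnt j).getD k 0 - 1)) cnt.length
        = m := by
      rw [pvEncP_set cnt _ k _ cnt.length hk hkv, huenc]
      have : ((pvDecF cnt j).getD k 0 - 1 - (pvDecF cnt j).getD k 0) = -1 := by ring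
      rw [this]
      omega
    have hveq : (pvDecF cnt j).set k ((pvDecF cnt j).getD k 0 - 1) = pvDecF cnt m := by
      rw [← hvenc]
      exact (pvDec_of_enc cnt hc _ (by rw [List.length_set]; omega) hvval).symm
    refine ⟨hveq, ?_, by omega⟩
    rw [← hveq, pvGetD_set_self _ k _ hkv]
    have := (huval k).2
    omega
  constructor
  · constructor
    · intro h
      exact (hfwd h).2
    · rintro ⟨hne, hjm⟩
      have hlt : (pvDecF cnt m).getD k 0 < cnt.getD k 0 := by
        have := (hsval k).2; omega
      have hks : k < (pvDecF cnt m).length := by omega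
      have hwval : ∀ i, 0 ≤ ((pvDecF cnt m).set k ((pvDecF cnt m).getD k 0 + 1)).getD i 0 ∧
          ((pvDecF cnt m).set k ((pvDecF cnt m).getD k 0 + 1)).getD i 0 ≤ cnt.getD i 0 := by
        intro i
        by_cases hik : i = k
        · subst hik
          rw [pvGetD_set_self _ i _ hks]
          have := (hsval i).1
          omega
        · rw [pvGetD_set_ne _ k i _ hik]; exact hsval i
      have hwenc : pvEncP cnt ((pvDecF cnt m).set k ((pvDecF cnt m).getD k 0 + 1)) cnt.length
          = j := by
        rw [pvEncP_set cnt _ k _ cnt.length hk hks, hsenc]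
        have : ((pvDecF cnt m).getD k 0 + 1 - (pvDecF cnt m).getD k 0) = 1 := by ring
        rw [this]
        omega
      have hweq : (pvDecF cnt m).set k ((pvDecF cnt m).getD k 0 + 1) = pvDecF cnt j := by
        rw [← hwenc]
        exact (pvDec_of_enc cnt hc _ (by rw [List.length_set]; omega) hwval).symm
      constructor
      · rw [← hweq, pvGetD_set_self _ k _ hks]
        have := (hsval k).1
        omega
      · omega
  · intro h
    exact (hfwd h).1
theorem pvOuterInv (prm cnt : List Int) (lim : Int)
    (hlen : prm.length = cnt.length) (hc : ∀ i, 0 ≤ cnt.getD i 0)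
    (hprm : ∀ i, i < prm.length → prm.getD i 0 ≤ lim) :
    ∀ (M : Nat), (M : Int) ≤ pvR cnt cnt.length →
    ((PySem.List.pyRange 0 (M : Int) 1).foldl
      (fun dp state =>
        let bf := PySem.List.pyGetD dp state ((0, 0) : Int × Int)
        let s := (pvDecode (pvScanMul 1 cnt) cnt.length state).1
        pvInner prm cnt (pvScanMul 1 cnt) lim cnt.length state bf.1 bf.2 s dp)
      (PySem.List.pySetD
        (List.replicate (pvR cnt cnt.length).toNat ((cnt.sum + 1, 1) : Int × Int)) 0
        (1, 1))).length = (pvR cnt cnt.length).toNat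
    ∧ ∀ (j : Int), 0 ≤ j → j < pvR cnt cnt.length →
      PySem.List.pyGetD ((PySem.List.pyRange 0 (M : Int) 1).foldl
        (fun dp state =>
          let bf := PySem.List.pyGetD dp state ((0, 0) : Int × Int)
          let s := (pvDecode (pvScanMul 1 cnt) cnt.length state).1
          pvInner prm cnt (pvScanMul 1 cnt) lim cnt.length state bf.1 bf.2 s dp)
        (PySem.List.pySetD
          (List.replicate (pvR cnt cnt.length).toNat ((cnt.sum + 1, 1) : Int × Int)) 0
          (1, 1))) j (0, 0)
      = List.foldl pvMinP (pvInitP cnt j) (pvCandsP prm cnt lim j (M : Int)) := by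
  have hNpos : 0 < pvR cnt cnt.length := pvR_pos cnt hc cnt.length
  have hdp0 : PySem.List.pySetD
      (List.replicate (pvR cnt cnt.length).toNat ((cnt.sum + 1, 1) : Int × Int)) 0 (1, 1)
      = (List.replicate (pvR cnt cnt.length).toNat ((cnt.sum + 1, 1) : Int × Int)).set 0 (1, 1) := by
    rw [PySem.List.pySetD_of_nonneg _ _ (by omega)]
    rfl
  have hdp0len : ((List.replicate (pvR cnt cnt.length).toNat
      ((cnt.sum + 1, 1) : Int × Int)).set 0 (1, 1)).length = (pvR cnt cnt.length).toNat := by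
    simp
  have hdp0get : ∀ (j : Int), 0 ≤ j → j < pvR cnt cnt.length →
      PySem.List.pyGetD ((List.replicate (pvR cnt cnt.length).toNat
        ((cnt.sum + 1, 1) : Int × Int)).set 0 (1, 1)) j (0, 0) = pvInitP cnt j := by
    intro j hj0 hjN
    rw [pvPyGetD_set _ 0 (by simp; omega) j hj0 (by simp; omega) _]
    unfold pvInitP
    by_cases hj : j = 0
    · rw [if_pos (by omega), if_pos hj]
    · rw [if_neg (by omega), if_neg hj]
      rw [PySem.List.pyGetD_eq_getElem _ _ hj0 (by simp; omega)]
      simp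
  intro M
  induction M with
  | zero =>
    intro _
    rw [show ((0 : Nat) : Int) = 0 by rfl, PySem.List.pyRange_one_eq_nil (le_refl 0),
      List.foldl_nil, hdp0]
    refine ⟨hdp0len, ?_⟩
    intro j hj0 hjN
    obtain ⟨hulen, huval, huenc⟩ := pvDecF_spec cnt hc j hj0 hjN
    have hfilter : ((List.range cnt.length).filter (fun k =>
        decide (0 < (pvDecF cnt j).getD k 0) && decide (j - pvR cnt k < (0 : Int)))) = [] := by
      apply List.filter_eq_nil_iff.mpr
      intro k hk
      by_cases hpos : 0 < (pvDecF cnt j).getD k 0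
      · have hge := pvEncP_ge_R cnt (pvDecF cnt j) hc (fun i => (huval i).1) cnt.length k
          (List.mem_range.mp hk) hpos
        rw [huenc] at hge
        have hd2 : decide (j - pvR cnt k < (0 : Int)) = false := by
          simp only [decide_eq_false_iff_not]; omega
        rw [hd2, Bool.and_false]
        simp
      · have hd1 : decide (0 < (pvDecF cnt j).getD k 0) = false := by
          simp only [decide_eq_false_iff_not]; omega
        rw [hd1, Bool.false_and]
        simp
    rw [hdp0get j hj0 hjN]
    unfold pvCandsP
    rw [hfilter]
    rfl
  | succ M ih =>
    intro hM1
    have hMle : (M : Int) ≤ pvR cnt cnt.length := by push_cast at hM1 ⊢; omega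
    have hMlt : (M : Int) < pvR cnt cnt.length := by push_cast at hM1 ⊢; omega
    obtain ⟨ihlen, ihget⟩ := ih hMle
    have hcast : ((M + 1 : Nat) : Int) = (M : Int) + 1 := by push_cast; ring
    rw [hcast, PySem.List.pyRange_one_succ_right (by omega), List.foldl_append, List.foldl_cons,
      List.foldl_nil]
    dsimp only
    -- the state processed in this step
    obtain ⟨hulen, huval, huenc⟩ := pvDecF_spec cnt hc (M : Int) (by omega) hMlt
    have hbf : PySem.List.pyGetD ((PySem.List.pyRange 0 (M : Int) 1).foldl
        (fun dp state =>
          let bf := PySem.List.pyGetD dp state ((0, 0) : Int × Int)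
          let s := (pvDecode (pvScanMul 1 cnt) cnt.length state).1
          pvInner prm cnt (pvScanMul 1 cnt) lim cnt.length state bf.1 bf.2 s dp)
        (PySem.List.pySetD
          (List.replicate (pvR cnt cnt.length).toNat ((cnt.sum + 1, 1) : Int × Int)) 0
          (1, 1))) (M : Int) (0, 0) = pvBestV prm lim (pvDecF cnt (M : Int)) := by
      rw [ihget (M : Int) (by omega) hMlt]
      exact pvState prm cnt lim hlen hc hprm (M : Int) (M : Int) (by omega) hMlt (le_refl _)
    rw [hbf]
    rw [show (pvDecode (pvScanMul 1 cnt) cnt.length (M : Int)).1 = pvDecF cnt (M : Int) from rfl]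
    obtain ⟨innlen, innget⟩ := pvInner_spec prm cnt lim (M : Int)
      (pvBestV prm lim (pvDecF cnt (M : Int))).1 (pvBestV prm lim (pvDecF cnt (M : Int))).2
      (pvDecF cnt (M : Int)) hc (by omega) hulen huval huenc _ ihlen
    refine ⟨by rw [innlen, ihlen], ?_⟩
    intro j hj0 hjN
    rw [innget j hj0 hjN, ihget j hj0 hjN, ← List.foldl_append]
    -- now: fold over cands j M ++ new candidates = fold over cands j (M+1)
    obtain ⟨hvlen, hvval, hvenc⟩ := pvDecF_spec cnt hc j hj0 hjN
    have hsplit : ((List.range cnt.length).filter (fun k =>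
          decide (0 < (pvDecF cnt j).getD k 0) && decide (j - pvR cnt k < (M : Int) + 1))).Perm
        (((List.range cnt.length).filter (fun k =>
          decide (0 < (pvDecF cnt j).getD k 0) && decide (j - pvR cnt k < (M : Int)))) ++
         ((List.range cnt.length).filter (fun k =>
          decide (0 < (pvDecF cnt j).getD k 0) && decide (j - pvR cnt k = (M : Int))))) := by
      have hcongr : ((List.range cnt.length).filter (fun k =>
          decide (0 < (pvDecF cnt j).getD k 0) && decide (j - pvR cnt k < (M : Int) + 1)))
          = ((List.range cnt.length).filter (fun k =>
            (decide (0 < (pvDecF cnt j).getD k 0) && decide (j - pvR cnt k < (M : Int))) ||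
            (decide (0 < (pvDecF cnt j).getD k 0) && decide (j - pvR cnt k = (M : Int))))) := by
        apply List.filter_congr
        intro k _
        rw [pvDecide_lt_succ, Bool.and_or_distrib_left]
      rw [hcongr]
      apply pvFilter_or_perm
      intro k _
      rintro ⟨hp, hq⟩
      simp only [Bool.and_eq_true, decide_eq_true_eq] at hp hq
      omega
    have hQeq : ((List.range cnt.length).filter (fun k =>
          decide (0 < (pvDecF cnt j).getD k 0) && decide (j - pvR cnt k = (M : Int)))).map
          (pvCand prm lim (pvDecF cnt j))
        = ((List.range cnt.length).filter (fun k =>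
          !((pvDecF cnt (M : Int)).getD k 0 == cnt.getD k 0) &&
            decide ((M : Int) + pvR cnt k = j))).map
          (fun k => pvStep prm lim k
            ((pvBestV prm lim (pvDecF cnt (M : Int))).1,
             (pvBestV prm lim (pvDecF cnt (M : Int))).2)) := by
      have hfeq : ((List.range cnt.length).filter (fun k =>
            decide (0 < (pvDecF cnt j).getD k 0) && decide (j - pvR cnt k = (M : Int))))
          = ((List.range cnt.length).filter (fun k =>
            !((pvDecF cnt (M : Int)).getD k 0 == cnt.getD k 0) &&
              decide ((M : Int) + pvR cnt k = j))) := by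
        apply List.filter_congr
        intro k hk
        have hedge := (pvEdge prm cnt lim hc (M : Int) j (by omega) hMlt hj0 hjN k
          (List.mem_range.mp hk)).1
        by_cases hlhs : 0 < (pvDecF cnt j).getD k 0 ∧ j - pvR cnt k = (M : Int)
        · have hrhs := hedge.mp hlhs
          have hb1 : (decide (0 < (pvDecF cnt j).getD k 0) &&
              decide (j - pvR cnt k = (M : Int))) = true := by
            simp only [Bool.and_eq_true, decide_eq_true_eq]
            exact hlhs
          have hb2 : (!((pvDecF cnt (M : Int)).getD k 0 == cnt.getD k 0) &&
              decide ((M : Int) + pvR cnt k = j)) = true := by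
            simp only [Bool.and_eq_true, Bool.not_eq_true', beq_eq_false_iff_ne, ne_eq,
              decide_eq_true_eq]
            exact hrhs
          rw [hb1, hb2]
        · have hrhs : ¬((pvDecF cnt (M : Int)).getD k 0 ≠ cnt.getD k 0 ∧
              (M : Int) + pvR cnt k = j) := fun hcon => hlhs (hedge.mpr hcon)
          have hb1 : (decide (0 < (pvDecF cnt j).getD k 0) &&
              decide (j - pvR cnt k = (M : Int))) = false := by
            rw [Bool.and_eq_false_iff]
            by_cases hd : 0 < (pvDecF cnt j).getD k 0
            · right; simp only [decide_eq_false_iff_not]; intro hcon; exact hlhs ⟨hd, hcon⟩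
            · left; simp only [decide_eq_false_iff_not]; exact hd
          have hb2 : (!((pvDecF cnt (M : Int)).getD k 0 == cnt.getD k 0) &&
              decide ((M : Int) + pvR cnt k = j)) = false := by
            rw [Bool.and_eq_false_iff]
            by_cases hd : (pvDecF cnt (M : Int)).getD k 0 = cnt.getD k 0
            · left; simp only [Bool.not_eq_false', beq_iff_eq]; exact hd
            · right; simp only [decide_eq_false_iff_not]; intro hcon; exact hrhs ⟨hd, hcon⟩
          rw [hb1, hb2]
      rw [← hfeq]
      apply List.map_congr_left
      intro k hkmem
      have hklt : k < cnt.length := List.mem_range.mp (List.mem_of_mem_filter hkmem)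
      have hkcond := List.of_mem_filter hkmem
      simp only [Bool.and_eq_true, decide_eq_true_eq] at hkcond
      have hset := (pvEdge prm cnt lim hc (M : Int) j (by omega) hMlt hj0 hjN k hklt).2 hkcond
      unfold pvCand
      rw [hset]
    rw [← hQeq]
    have hperm : (pvCandsP prm cnt lim j (M : Int) ++
        ((List.range cnt.length).filter (fun k =>
          decide (0 < (pvDecF cnt j).getD k 0) && decide (j - pvR cnt k = (M : Int)))).map
          (pvCand prm lim (pvDecF cnt j))).Perm (pvCandsP prm cnt lim j ((M : Int) + 1)) := by
      unfold pvCandsP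
      rw [← List.map_append]
      exact (List.Perm.map _ hsplit).symm
    exact pvFoldl_minP_perm _ _ hperm _
theorem pvRdxLast (cnt : List Int) :
    PySem.List.pyGetD (pvScanMul 1 cnt) (-1) 0 = pvR cnt cnt.length := by
  have hlen := pvScanMul_length 1 cnt
  have hne : pvScanMul 1 cnt ≠ [] := by
    intro hcon
    rw [hcon] at hlen
    simp at hlen
  rw [PySem.List.pyGetD_neg_one _ _ hne, List.getLast_eq_getElem]
  have hgd : (pvScanMul 1 cnt)[(pvScanMul 1 cnt).length - 1]
      = (pvScanMul 1 cnt).getD ((pvScanMul 1 cnt).length - 1) 0 := by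
    rw [List.getD_eq_getElem?_getD, List.getElem?_eq_getElem (by omega)]
    rfl
  rw [hgd, hlen]
  simp only [Nat.add_sub_cancel]
  rw [pvScanMul_getD cnt 1 cnt.length (le_refl _)]
  ring

theorem pvGetD_last (l : List (Int × Int)) (h : l ≠ []) :
    PySem.List.pyGetD l (-1) (0, 0) = PySem.List.pyGetD l ((l.length - 1 : Nat) : Int) (0, 0) := by
  have hpos : 0 < l.length := List.length_pos_iff.mpr h
  rw [PySem.List.pyGetD_neg_one _ _ h, List.getLast_eq_getElem,
    PySem.List.pyGetD_eq_getElem _ _ (by omega) (by push_cast; omega)]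
  simp

theorem pvCore (prm cnt : List Int) (lim : Int)
    (hlen : prm.length = cnt.length) (hc : ∀ i, 0 ≤ cnt.getD i 0)
    (hprm : ∀ i, i < prm.length → prm.getD i 0 ≤ lim) :
    (PySem.List.pyGetD
      ((PySem.List.pyRange 0 (PySem.List.pyGetD (pvScanMul 1 cnt) (-1) 0) 1).foldl
        (fun dp state =>
          let bf := PySem.List.pyGetD dp state ((0, 0) : Int × Int)
          let s := (pvDecode (pvScanMul 1 cnt) prm.length state).1
          pvInner prm cnt (pvScanMul 1 cnt) lim prm.length state bf.1 bf.2 s dp)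
        (PySem.List.pySetD
          (List.replicate (PySem.List.pyGetD (pvScanMul 1 cnt) (-1) 0).toNat
            ((cnt.sum + 1, 1) : Int × Int)) 0 (1, 1)))
      (-1) ((0, 0) : Int × Int)).1
    = (pvBest prm lim ((cnt.map Int.toNat).sum) cnt).1 := by
  have hNpos : 0 < pvR cnt cnt.length := pvR_pos cnt hc cnt.length
  rw [pvRdxLast cnt]
  simp only [hlen]
  have hNcast : (((pvR cnt cnt.length).toNat : Nat) : Int) = pvR cnt cnt.length :=
    Int.toNat_of_nonneg (by omega)
  obtain ⟨flen, fget⟩ := pvOuterInv prm cnt lim hlen hc hprm (pvR cnt cnt.length).toNat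
    (by omega)
  rw [hNcast] at flen fget
  have hfne : ((PySem.List.pyRange 0 (pvR cnt cnt.length) 1).foldl
      (fun dp state =>
        let bf := PySem.List.pyGetD dp state ((0, 0) : Int × Int)
        let s := (pvDecode (pvScanMul 1 cnt) cnt.length state).1
        pvInner prm cnt (pvScanMul 1 cnt) lim cnt.length state bf.1 bf.2 s dp)
      (PySem.List.pySetD
        (List.replicate (pvR cnt cnt.length).toNat ((cnt.sum + 1, 1) : Int × Int)) 0
        (1, 1))) ≠ [] := by
    intro hcon
    rw [hcon] at flen
    simp at flen
    omega
  rw [pvGetD_last _ hfne, flen]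
  have hjlt : (((pvR cnt cnt.length).toNat - 1 : Nat) : Int) < pvR cnt cnt.length := by
    push_cast
    omega
  rw [fget (((pvR cnt cnt.length).toNat - 1 : Nat) : Int) (by push_cast; omega) hjlt]
  rw [pvState prm cnt lim hlen hc hprm _ _ (by push_cast; omega) hjlt (by push_cast; omega)]
  have hj : (((pvR cnt cnt.length).toNat - 1 : Nat) : Int) = pvEncP cnt cnt cnt.length := by
    rw [pvEncP_full cnt hc cnt.length (le_refl _)]
    push_cast
    omega
  rw [hj, pvDec_of_enc cnt hc cnt rfl (fun i => ⟨hc i, le_refl _⟩)]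
  rfl
theorem pvCnt_nonneg (x : Int) :
    ∀ i, 0 ≤ ((pvPrimeFactors x).items.map (·.2)).getD i 0 := by
  intro i
  by_cases hi : i < ((pvPrimeFactors x).items.map (·.2)).length
  · rw [List.getD_eq_getElem?_getD, List.getElem?_eq_getElem hi]
    exact pvPF_values_nonneg x _ (List.getElem_mem hi)
  · rw [pvGetD_oob _ i (by omega)]

set_option maxHeartbeats 1000000 in
theorem pvCalcEq_dict (pf : PySem.Dict Int Int) (lim : Int)
    (hv : ∀ i, 0 ≤ (pf.items.map (·.2)).getD i 0) :
    (match PySem.List.max? pf.keys (fun y => y) with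
     | none => (0 : Int)
     | some mx =>
       if mx > lim then -1
       else
         (PySem.List.pyGetD
           ((PySem.List.pyRange 0
               (PySem.List.pyGetD (pvScanMul 1 (pf.items.map (·.2))) (-1) 0) 1).foldl
             (fun dp state =>
               let bf := PySem.List.pyGetD dp state ((0, 0) : Int × Int)
               let s := (pvDecode (pvScanMul 1 (pf.items.map (·.2)))
                 (pf.items.map (·.1)).length state).1
               pvInner (pf.items.map (·.1)) (pf.items.map (·.2))
                 (pvScanMul 1 (pf.items.map (·.2))) lim (pf.items.map (·.1)).length
                 state bf.1 bf.2 s dp)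
             (PySem.List.pySetD
               (List.replicate
                 (PySem.List.pyGetD (pvScanMul 1 (pf.items.map (·.2))) (-1) 0).toNat
                 (((pf.items.map (·.2)).sum + 1, 1) : Int × Int)) 0 (1, 1)))
           (-1) ((0, 0) : Int × Int)).1)
    = (match PySem.List.max? pf.keys (fun y => y) with
       | none => (0 : Int)
       | some mx =>
         if mx > lim then -1
         else (pvBest pf.keys lim ((pf.values.map Int.toNat).sum) pf.values).1) := by
  cases hmx : PySem.List.max? pf.keys (fun y => y) with
  | none => rfl
  | some mx =>
    dsimp only
    by_cases hgt : mx > lim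
    · rw [if_pos hgt, if_pos hgt]
    · rw [if_neg hgt, if_neg hgt]
      have hprm : ∀ i, i < (pf.items.map (·.1)).length →
          (pf.items.map (·.1)).getD i 0 ≤ lim := by
        intro i hi
        rw [List.getD_eq_getElem?_getD, List.getElem?_eq_getElem hi]
        have hmem : (pf.items.map (·.1))[i] ∈ pf.keys := List.getElem_mem hi
        have := PySem.List.max?_isMax hmx _ hmem
        simp only at this
        rw [Option.getD_some]
        omega
      have hgen := pvCore (pf.items.map (·.1)) (pf.items.map (·.2)) lim (by simp) hv hprm
      convert hgen using 2

set_option maxHeartbeats 1000000 in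
theorem calc_py_eq (x lim : Int) : calc_py x lim = calc_py_alt x lim := by
  unfold calc_py calc_py_alt
  convert pvCalcEq_dict (pvPrimeFactors x) lim (pvCnt_nonneg x) using 2

-- ===== VERDICT (by name: the statement is the Claim_ definition above) =====
theorem calc_py_spec : Claim_equal_calc_py := by
  intro x lim _ _
  unfold Spec_calc_py
  exact calc_py_eq x lim
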